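-- pv_equiv track=rewrite | github.com/baaaaaaaka/cursor_cli_manager_pre_release | cursor_cli_manager/tui.py | _derive_title_from_history
-- ===== SOURCE A (Python) =====
-- from typing import Callable, Dict, List, Optional, Set, Tuple, Union
--
-- def _derive_title_from_history(history_text: str) -> Optional[str]:
--     """
--     Try to derive a human-friendly title from the history preview text.
--     """
--     lines = [ln.strip() for ln in history_text.splitlines()]
--     # Find the first "User:" block and pick the first meaningful line after it.
--     for i, ln in enumerate(lines):
--         if ln.lower() in ("user:", "user"):
--             for j in range(i + 1, len(lines)):
--                 cand = lines[j].strip()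
--                 if not cand:
--                     continue
--                 # Skip common wrapper tags.
--                 if cand.lower() in (
--                     "<user_query>",
--                     "</user_query>",
--                     "<user_info>",
--                     "</user_info>",
--                 ):
--                     continue
--                 # Skip other angle-bracket tags.
--                 if cand.startswith("<") and cand.endswith(">"):
--                     continue
--                 return cand
--     return None
-- ===== SOURCE B (Python) =====
-- from typing import Optional
--
--
-- def _derive_title_from_history(history_text: str) -> Optional[str]:
--     """
--     Try to derive a human-friendly title from the history preview text.
--
--     Single flat pass over the stripped lines, keeping a `seen_user` flag
--     instead of nested index loops.
--     """
--     seen_user = False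
--     for line in (ln.strip() for ln in history_text.splitlines()):
--         if not seen_user:
--             if line.lower() in ("user:", "user"):
--                 seen_user = True
--             continue
--         if not line:
--             continue
--         if line.lower() in (
--             "<user_query>",
--             "</user_query>",
--             "<user_info>",
--             "</user_info>",
--         ):
--             continue
--         if line.startswith("<") and line.endswith(">"):
--             continue
--         return line
--     return None
-- ===== Notes on version B (the rewrite author's own statement) =====
-- stated objective: simpler
-- what changed: Replaced A's nested loops (find each 'User:' marker, then rescan the rest of the list for a meaningful line) by a single flat pass over the stripped lines that carries a seen_user flag: marker lines flip the flag, and once it is set the first line passing the meaningfulness filter is returned.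
import Mathlib
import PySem

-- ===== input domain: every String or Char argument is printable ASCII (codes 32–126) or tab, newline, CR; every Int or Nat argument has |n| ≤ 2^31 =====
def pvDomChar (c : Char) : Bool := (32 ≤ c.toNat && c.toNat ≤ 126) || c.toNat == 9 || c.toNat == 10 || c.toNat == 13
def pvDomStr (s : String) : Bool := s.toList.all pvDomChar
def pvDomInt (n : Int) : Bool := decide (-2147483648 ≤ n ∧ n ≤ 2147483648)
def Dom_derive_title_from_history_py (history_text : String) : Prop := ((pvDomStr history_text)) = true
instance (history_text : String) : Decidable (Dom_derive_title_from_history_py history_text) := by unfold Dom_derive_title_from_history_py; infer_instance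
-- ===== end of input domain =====

-- B replaces A's nested outer/inner index loops by one flat pass with a `seen_user` flag (objective: simpler).

-- ===== PORT A =====
-- inner loop: for j in range(i + 1, len(lines)), as recursion on the suffix after the marker
def pvA_inner (lines : List String) : Option String :=
  match lines with
  | [] => none
  | l :: rest =>
    let cand := PySem.Str.strip l
    if cand = "" then pvA_inner rest
    else if PySem.Str.lower cand = "<user_query>" ∨ PySem.Str.lower cand = "</user_query>" ∨
            PySem.Str.lower cand = "<user_info>" ∨ PySem.Str.lower cand = "</user_info>" then
      pvA_inner rest
    else if PySem.Str.startswith cand "<" && PySem.Str.endswith cand ">" then pvA_inner rest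
    else some cand

-- outer loop: for i, ln in enumerate(lines), as recursion on the list (the tail is the range i+1..)
def pvA_outer (lines : List String) : Option String :=
  match lines with
  | [] => none
  | l :: rest =>
    if PySem.Str.lower l = "user:" ∨ PySem.Str.lower l = "user" then
      match pvA_inner rest with
      | some c => some c
      | none => pvA_outer rest
    else pvA_outer rest

def derive_title_from_history_py (history_text : String) : Option String :=
  pvA_outer ((PySem.Str.splitlines history_text).map PySem.Str.strip)

-- ===== PORT B =====
-- one flat pass with a seen_user flag (state machine over the stripped lines)
def pvB_loop (seen_user : Bool) (lines : List String) : Option String :=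
  match seen_user, lines with
  | _, [] => none
  | false, line :: rest =>
    if PySem.Str.lower line = "user:" ∨ PySem.Str.lower line = "user" then pvB_loop true rest
    else pvB_loop false rest
  | true, line :: rest =>
    if line = "" then pvB_loop true rest
    else if PySem.Str.lower line = "<user_query>" ∨ PySem.Str.lower line = "</user_query>" ∨
            PySem.Str.lower line = "<user_info>" ∨ PySem.Str.lower line = "</user_info>" then
      pvB_loop true rest
    else if PySem.Str.startswith line "<" && PySem.Str.endswith line ">" then pvB_loop true rest
    else some line

def derive_title_from_history_py_alt (history_text : String) : Option String :=
  pvB_loop false ((PySem.Str.splitlines history_text).map PySem.Str.strip)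

-- ===== PRECONDITION & SPEC =====
def Spec_derive_title_from_history_py (history_text : String) (out : Option String) : Prop := out = derive_title_from_history_py_alt history_text
instance (history_text : String) (out : Option String) : Decidable (Spec_derive_title_from_history_py history_text out) := by unfold Spec_derive_title_from_history_py; infer_instance

-- ===== CLAIM (what is proved, stated in full; the proofs are below) =====
def Claim_equal_derive_title_from_history_py : Prop := ∀ (history_text : String), Dom_derive_title_from_history_py history_text → Spec_derive_title_from_history_py history_text (derive_title_from_history_py history_text)

-- ===== LEMMAS AND PROOFS =====

-- strip is idempotent
theorem pv_chars_strip_idem (l : List Char) :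
    PySem.Chars.strip (PySem.Chars.strip l) = PySem.Chars.strip l := by
  show PySem.Chars.rstrip (PySem.Chars.lstrip (PySem.Chars.rstrip (PySem.Chars.lstrip l)))
      = PySem.Chars.rstrip (PySem.Chars.lstrip l)
  have hr : ∀ t : List Char, PySem.Chars.rstrip t = t.rdropWhile PySem.Chars.isspace := fun _ => rfl
  have hl : ∀ t : List Char, PySem.Chars.lstrip t = t.dropWhile PySem.Chars.isspace := fun _ => rfl
  simp only [hr, hl]
  set p := PySem.Chars.isspace
  set t := List.dropWhile p l with ht
  have hstep : (t.rdropWhile p).dropWhile p = t.rdropWhile p := by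
    obtain ⟨r, hrEq⟩ := List.rdropWhile_prefix p t
    cases hE : t.rdropWhile p with
    | nil => simp
    | cons a u =>
      have ht2 : List.dropWhile p l = a :: (u ++ r) := by
        rw [← ht, ← hrEq, hE]; simp
      have h3 := List.dropWhile_get_zero_not p l (by rw [ht2]; simp)
      simp only [ht2, List.get_eq_getElem, List.getElem_cons_zero] at h3
      simp [h3]
  rw [hstep, List.rdropWhile_idempotent]

theorem pv_strip_idem (s : String) : PySem.Str.strip (PySem.Str.strip s) = PySem.Str.strip s := by
  simp [PySem.Str.strip, pv_chars_strip_idem]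

-- a marker line ("user:"/"user" after lower) does not start with '<'
theorem pv_marker_not_lt (l : String)
    (h : PySem.Str.lower l = "user:" ∨ PySem.Str.lower l = "user") :
    PySem.Str.startswith l "<" = false := by
  by_contra hne
  have hsw : PySem.Str.startswith l "<" = true := by
    cases hb : PySem.Str.startswith l "<" with
    | false => exact absurd hb hne
    | true => rfl
  have hpre : ("<" : String).toList <+: l.toList := by
    have := PySem.Chars.startswith_iff (s := l.toList) (p := ("<" : String).toList)
    exact this.mp (by simpa [PySem.Str.startswith] using hsw)
  obtain ⟨r, hr⟩ := hpre
  have hlow : (PySem.Str.lower l).toList = ('<' :: r).map PySem.Chars.lowerChar := by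
    rw [PySem.Str.toList_lower, ← hr]; rfl
  rcases h with h | h <;> rw [h] at hlow <;> simp [PySem.Chars.lowerChar] at hlow <;>
    exact absurd hlow.1 (by decide)

-- whole-list invariant: every line is already stripped
def pvStripped (ls : List String) : Prop := ∀ l ∈ ls, PySem.Str.strip l = l

-- after the marker, A's inner scan and B's seen_user-phase agree on stripped lines
theorem pv_inner_eq (ls : List String) (hs : pvStripped ls) :
    pvA_inner ls = pvB_loop true ls := by
  induction ls with
  | nil => rfl
  | cons l rest ih =>
    have hl : PySem.Str.strip l = l := hs l (by simp)
    have hrest : pvStripped rest := fun x hx => hs x (by simp [hx])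
    simp only [pvA_inner, pvB_loop, hl]
    split_ifs <;> simp_all

-- if A's inner scan from a marker finds nothing, no later marker helps either
theorem pv_inner_none (ls : List String) (hs : pvStripped ls)
    (h : pvA_inner ls = none) : pvA_outer ls = none := by
  induction ls with
  | nil => rfl
  | cons l rest ih =>
    have hl : PySem.Str.strip l = l := hs l (by simp)
    have hrest : pvStripped rest := fun x hx => hs x (by simp [hx])
    simp only [pvA_inner, hl] at h
    by_cases hm : PySem.Str.lower l = "user:" ∨ PySem.Str.lower l = "user"
    · -- a marker line would itself be returned by the inner scan: contradiction with h
      exfalso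
      have hne : l ≠ "" := by
        intro h0; rw [h0] at hm
        rcases hm with hm | hm <;> simp [PySem.Str.lower, PySem.Chars.lower] at hm
      have hnw : ¬ (PySem.Str.lower l = "<user_query>" ∨ PySem.Str.lower l = "</user_query>" ∨
          PySem.Str.lower l = "<user_info>" ∨ PySem.Str.lower l = "</user_info>") := by
        rcases hm with hm | hm <;> rw [hm] <;> decide
      have hlt := pv_marker_not_lt l hm
      rw [if_neg hne, if_neg hnw, if_neg (by intro hc; rw [Bool.and_eq_true] at hc; rw [hlt] at hc; simp at hc)] at h
      exact Option.some_ne_none _ h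
    · simp only [pvA_outer, if_neg hm]
      apply ih hrest
      split_ifs at h <;> exact h

-- the main invariant: nested scans = flat pass, on stripped lines
theorem pv_outer_eq (ls : List String) (hs : pvStripped ls) :
    pvA_outer ls = pvB_loop false ls := by
  induction ls with
  | nil => rfl
  | cons l rest ih =>
    have hrest : pvStripped rest := fun x hx => hs x (by simp [hx])
    by_cases hm : PySem.Str.lower l = "user:" ∨ PySem.Str.lower l = "user"
    · simp only [pvA_outer, pvB_loop, if_pos hm]
      rw [← pv_inner_eq rest hrest]
      cases hin : pvA_inner rest with
      | some c => rfl
      | none => exact pv_inner_none rest hrest hin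
    · simp only [pvA_outer, pvB_loop, if_neg hm]
      exact ih hrest

-- ===== VERDICT (by name: the statement is the Claim_ definition above) =====
theorem derive_title_from_history_py_spec : Claim_equal_derive_title_from_history_py := by
  intro s _
  show derive_title_from_history_py s = derive_title_from_history_py_alt s
  unfold derive_title_from_history_py derive_title_from_history_py_alt
  apply pv_outer_eq
  intro l hl
  obtain ⟨r, _, rfl⟩ := List.mem_map.mp hl
  exact pv_strip_idem r
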